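-- pv_equiv track=rewrite | github.com/dunamismax/dunamismax | scripts/generate_docs.py | render_bucket_table
-- ===== SOURCE A (Python) =====
-- from collections import defaultdict
--
-- def sort_repos(repos: list[dict[str, object]], key: str) -> list[dict[str, object]]:
--     return sorted(repos, key=lambda repo: int(repo[key]))
--
-- def render_bucket_table(
--     repos: list[dict[str, object]],
--     heading: str,
--     column_name: str,
--     bucket_key: str,
--     ordered_buckets: list[str],
-- ) -> str:
--     grouped: dict[str, list[str]] = defaultdict(list)
--     for repo in sort_repos(repos, "index_order"):
--         grouped[str(repo[bucket_key])].append(str(repo["slug"]))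
--
--     lines = [
--         f"## {heading}",
--         "",
--         f"| {column_name} | Repos |",
--         "|---|---|",
--     ]
--     for bucket in ordered_buckets:
--         names = ", ".join(grouped[bucket])
--         lines.append(f"| **{bucket}** | {names} |")
--     return "\n".join(lines)
-- ===== SOURCE B (Python) =====
-- def render_bucket_table(
--     repos,
--     heading,
--     column_name,
--     bucket_key,
--     ordered_buckets,
-- ):
--     sorted_repos = sorted(repos, key=lambda repo: int(repo["index_order"]))
--     header = [
--         f"## {heading}",
--         "",
--         f"| {column_name} | Repos |",
--         "|---|---|",
--     ]
--     rows = [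
--         "| **{}** | {} |".format(
--             bucket,
--             ", ".join(str(r["slug"]) for r in sorted_repos if str(r[bucket_key]) == bucket),
--         )
--         for bucket in ordered_buckets
--     ]
--     return "\n".join(header + rows)
-- ===== Notes on version B (the rewrite author's own statement) =====
-- stated objective: simpler
-- what changed: B drops the defaultdict grouping pass entirely: it sorts once and builds each row by a direct list-comprehension scan of the sorted list per bucket, joining header and rows in one expression.
import Mathlib
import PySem

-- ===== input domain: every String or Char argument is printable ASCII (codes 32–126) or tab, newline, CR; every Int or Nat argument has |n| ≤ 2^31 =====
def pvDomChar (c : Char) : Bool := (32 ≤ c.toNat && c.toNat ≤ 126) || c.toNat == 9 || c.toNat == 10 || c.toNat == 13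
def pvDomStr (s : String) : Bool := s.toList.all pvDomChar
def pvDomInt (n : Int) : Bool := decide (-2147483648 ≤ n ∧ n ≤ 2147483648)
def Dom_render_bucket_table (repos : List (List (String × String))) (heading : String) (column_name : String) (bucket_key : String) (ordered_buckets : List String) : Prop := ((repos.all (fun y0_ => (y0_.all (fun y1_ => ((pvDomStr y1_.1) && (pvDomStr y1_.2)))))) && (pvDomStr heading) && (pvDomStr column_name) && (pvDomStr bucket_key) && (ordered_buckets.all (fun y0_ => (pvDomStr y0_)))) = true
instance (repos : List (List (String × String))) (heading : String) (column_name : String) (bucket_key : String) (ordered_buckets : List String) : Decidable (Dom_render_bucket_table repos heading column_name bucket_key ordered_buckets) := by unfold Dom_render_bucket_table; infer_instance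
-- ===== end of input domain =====

-- B replaces A's defaultdict grouping pass by one direct filter of the sorted list per bucket (simpler, no dict).

-- ===== PORT A =====
def sort_repos (repos : List (List (String × String))) (key : String) : List (List (String × String)) :=
  PySem.List.sorted repos (fun repo => (PySem.Int.ofStr? (((PySem.Dict.mk repo).get? key).getD "")).getD 0)

def render_bucket_table (repos : List (List (String × String))) (heading : String) (column_name : String) (bucket_key : String) (ordered_buckets : List String) : String :=
  let grouped : PySem.Dict String (List String) :=
    (sort_repos repos "index_order").foldl
      (fun g repo =>
        g.modify (((PySem.Dict.mk repo).get? bucket_key).getD "") []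
          (fun v => v ++ [((PySem.Dict.mk repo).get? "slug").getD ""]))
      PySem.Dict.empty
  let lines : List String :=
    ["## " ++ heading, "", "| " ++ column_name ++ " | Repos |", "|---|---|"]
  let lines := ordered_buckets.foldl
    (fun ls bucket =>
      ls ++ ["| **" ++ bucket ++ "** | " ++ PySem.Str.join ", " (grouped.getD bucket []) ++ " |"])
    lines
  PySem.Str.join "\n" lines

-- ===== PORT B =====
def render_bucket_table_alt (repos : List (List (String × String))) (heading : String) (column_name : String) (bucket_key : String) (ordered_buckets : List String) : String :=
  let sorted_repos :=
    PySem.List.sorted repos (fun repo => (PySem.Int.ofStr? (((PySem.Dict.mk repo).get? "index_order").getD "")).getD 0)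
  let header : List String :=
    ["## " ++ heading, "", "| " ++ column_name ++ " | Repos |", "|---|---|"]
  let rows := ordered_buckets.map
    (fun bucket =>
      "| **" ++ bucket ++ "** | " ++
        PySem.Str.join ", "
          ((sorted_repos.filter (fun r => ((PySem.Dict.mk r).get? bucket_key).getD "" == bucket)).map
            (fun r => ((PySem.Dict.mk r).get? "slug").getD "")) ++ " |")
  PySem.Str.join "\n" (header ++ rows)

-- ===== PRECONDITION & SPEC =====
-- Pre_ excludes inputs where the Python raises: a repo missing the "index_order", "slug" or
-- bucket_key key (KeyError) or whose "index_order" value int() cannot parse (ValueError);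
-- it also excludes repos with duplicate keys, which do not encode a Python dict.
def Pre_render_bucket_table (repos : List (List (String × String))) (heading : String) (column_name : String) (bucket_key : String) (ordered_buckets : List String) : Prop :=
  ∀ r ∈ repos,
    (r.map Prod.fst).Nodup ∧
    ((((PySem.Dict.mk r).get? "index_order").getD "").length > 0 ∧
      (PySem.Int.ofStr? (((PySem.Dict.mk r).get? "index_order").getD "")).isSome) ∧
    ((PySem.Dict.mk r).get? "slug").isSome ∧
    ((PySem.Dict.mk r).get? bucket_key).isSome
instance (repos : List (List (String × String))) (heading : String) (column_name : String) (bucket_key : String) (ordered_buckets : List String) : Decidable (Pre_render_bucket_table repos heading column_name bucket_key ordered_buckets) := by unfold Pre_render_bucket_table; infer_instance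

def pvWitness_render_bucket_table : (List (List (String × String))) × String × String × String × List String :=
  ([[("index_order", "2"), ("slug", "alpha"), ("cat", "X")],
    [("index_order", "1"), ("slug", "beta"), ("cat", "Y")]],
   "Projects", "Category", "cat", ["X", "Y", "Z"])

def Spec_render_bucket_table (repos : List (List (String × String))) (heading : String) (column_name : String) (bucket_key : String) (ordered_buckets : List String) (out : String) : Prop := out = render_bucket_table_alt repos heading column_name bucket_key ordered_buckets
instance (repos : List (List (String × String))) (heading : String) (column_name : String) (bucket_key : String) (ordered_buckets : List String) (out : String) : Decidable (Spec_render_bucket_table repos heading column_name bucket_key ordered_buckets out) := by unfold Spec_render_bucket_table; infer_instance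

-- ===== CLAIM (what is proved, stated in full; the proofs are below) =====
def Claim_equal_render_bucket_table : Prop := ∀ (repos : List (List (String × String))) (heading : String) (column_name : String) (bucket_key : String) (ordered_buckets : List String), Dom_render_bucket_table repos heading column_name bucket_key ordered_buckets → Pre_render_bucket_table repos heading column_name bucket_key ordered_buckets → Spec_render_bucket_table repos heading column_name bucket_key ordered_buckets (render_bucket_table repos heading column_name bucket_key ordered_buckets)

-- ===== LEMMAS AND PROOFS =====

-- A's grouping fold read back at one bucket IS the filtered slugs, in order.
theorem pvGroup {α : Type} (kb sl : α → String) (l : List α)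
    (d : PySem.Dict String (List String)) (b : String) :
    (l.foldl (fun g r => g.modify (kb r) [] (fun v => v ++ [sl r])) d).getD b []
      = d.getD b [] ++ (l.filter (fun r => kb r == b)).map sl := by
  induction l generalizing d with
  | nil => simp
  | cons r t ih =>
    simp only [List.foldl_cons, List.filter_cons]
    rw [ih, PySem.Dict.getD_modify]
    by_cases h : b = kb r
    · subst h
      simp
    · have h2 : (kb r == b) = false := beq_eq_false_iff_ne.mpr (fun e => h e.symm)
      simp [h, h2]

-- ===== VERDICT (by name: the statement is the Claim_ definition above) =====
theorem render_bucket_table_spec : Claim_equal_render_bucket_table := by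
  intro repos heading column_name bucket_key ordered_buckets _ _
  simp only [Spec_render_bucket_table, render_bucket_table, render_bucket_table_alt, sort_repos]
  rw [PySem.List.foldl_append_singleton_eq_map]
  refine congrArg (PySem.Str.join "\n") (congrArg _ (List.map_congr_left ?_))
  intro b _
  rw [pvGroup (fun repo => ((PySem.Dict.mk repo).get? bucket_key).getD "")
        (fun repo => ((PySem.Dict.mk repo).get? "slug").getD "")]
  simp [PySem.Dict.getD_empty]
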